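-- pv_equiv track=rewrite | github.com/platform-mesh/samples-opendesk-ocm-k8s-toolkit | scripts/extract-oci-image-urls/update_component_constructors.py | _matches_component_pattern
-- ===== SOURCE A (Python) =====
-- def _matches_component_pattern(app_instance: str, component_path: str) -> bool:
--     """Check if app instance matches the component reference path pattern."""
--     component_mappings = {
--         'ums': 'nubus',
--         'intercom': 'nubus',
--         'keycloak': 'nubus',
--         'nginx-s3-gateway': 'nubus',
--         'dovecot': 'open-xchange',
--         'open-xchange': 'open-xchange',
--         'ox-connector': 'open-xchange',
--         'nextcloud': 'nextcloud',
--         'element': 'element',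
--         'synapse': 'element',
--         'matrix': 'element',
--         'collabora': 'collabora',
--         'cryptpad': 'cryptpad',
--         'jitsi': 'jitsi',
--         'openproject': 'openproject',
--         'xwiki': 'xwiki',
--     }
--
--     for app_pattern, component in component_mappings.items():
--         if app_pattern in app_instance.lower() and component == component_path:
--             return True
--
--     return False
-- ===== SOURCE B (Python) =====
-- def _matches_component_pattern(app_instance: str, component_path: str) -> bool:
--     """Check if app instance matches the component reference path pattern."""
--     patterns_by_component = {
--         'nubus': ['ums', 'intercom', 'keycloak', 'nginx-s3-gateway'],
--         'open-xchange': ['dovecot', 'open-xchange', 'ox-connector'],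
--         'nextcloud': ['nextcloud'],
--         'element': ['element', 'synapse', 'matrix'],
--         'collabora': ['collabora'],
--         'cryptpad': ['cryptpad'],
--         'jitsi': ['jitsi'],
--         'openproject': ['openproject'],
--         'xwiki': ['xwiki'],
--     }
--     lowered = app_instance.lower()
--     return any(p in lowered for p in patterns_by_component.get(component_path, []))
-- ===== Notes on version B (the rewrite author's own statement) =====
-- stated objective: faster
-- what changed: Inverts the flat pattern->component mapping into an index keyed by component_path, so one dict lookup selects the (possibly empty) group of patterns and only those are substring-tested against the lowered app name, instead of scanning all 16 entries with a per-entry substring test and component comparison.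
import Mathlib
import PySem

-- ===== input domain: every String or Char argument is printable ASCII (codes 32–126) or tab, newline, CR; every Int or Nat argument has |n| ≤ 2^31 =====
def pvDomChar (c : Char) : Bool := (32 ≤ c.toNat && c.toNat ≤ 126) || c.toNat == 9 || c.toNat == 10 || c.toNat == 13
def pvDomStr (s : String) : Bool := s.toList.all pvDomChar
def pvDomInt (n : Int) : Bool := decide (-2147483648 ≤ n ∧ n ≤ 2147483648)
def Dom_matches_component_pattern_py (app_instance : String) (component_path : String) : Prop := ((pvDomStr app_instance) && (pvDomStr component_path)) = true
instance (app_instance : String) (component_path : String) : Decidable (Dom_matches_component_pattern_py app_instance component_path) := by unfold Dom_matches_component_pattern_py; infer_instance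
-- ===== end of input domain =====

-- B replaces A's scan over all 16 (pattern, component) entries by an index keyed by
-- component_path: one dict lookup selects the relevant pattern group, which is then
-- tested against the lowered app name (objective: idiomatic).

-- ===== PORT A =====
def pvMappingsA : List (String × String) :=
  [("ums", "nubus"), ("intercom", "nubus"), ("keycloak", "nubus"),
   ("nginx-s3-gateway", "nubus"), ("dovecot", "open-xchange"),
   ("open-xchange", "open-xchange"), ("ox-connector", "open-xchange"),
   ("nextcloud", "nextcloud"), ("element", "element"), ("synapse", "element"),
   ("matrix", "element"), ("collabora", "collabora"), ("cryptpad", "cryptpad"),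
   ("jitsi", "jitsi"), ("openproject", "openproject"), ("xwiki", "xwiki")]

-- the for-loop with early return, over app_pattern/component pairs
def pvScanA (app_instance : String) (component_path : String) : List (String × String) → Bool
  | [] => false
  | (app_pattern, component) :: rest =>
      if PySem.Str.isIn app_pattern (PySem.Str.lower app_instance) && component == component_path
      then true
      else pvScanA app_instance component_path rest

def matches_component_pattern_py (app_instance : String) (component_path : String) : Bool :=
  pvScanA app_instance component_path pvMappingsA

-- ===== PORT B =====
def pvIndexB : PySem.Dict String (List String) := PySem.Dict.mk
  [("nubus", ["ums", "intercom", "keycloak", "nginx-s3-gateway"]),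
   ("open-xchange", ["dovecot", "open-xchange", "ox-connector"]),
   ("nextcloud", ["nextcloud"]),
   ("element", ["element", "synapse", "matrix"]),
   ("collabora", ["collabora"]),
   ("cryptpad", ["cryptpad"]),
   ("jitsi", ["jitsi"]),
   ("openproject", ["openproject"]),
   ("xwiki", ["xwiki"])]

def matches_component_pattern_py_alt (app_instance : String) (component_path : String) : Bool :=
  let lowered := PySem.Str.lower app_instance
  (PySem.Dict.getD pvIndexB component_path []).any (fun p => PySem.Str.isIn p lowered)

-- ===== PRECONDITION & SPEC =====
def Spec_matches_component_pattern_py (app_instance : String) (component_path : String) (out : Bool) : Prop := out = matches_component_pattern_py_alt app_instance component_path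
instance (app_instance : String) (component_path : String) (out : Bool) : Decidable (Spec_matches_component_pattern_py app_instance component_path out) := by unfold Spec_matches_component_pattern_py; infer_instance

-- ===== CLAIM (what is proved, stated in full; the proofs are below) =====
def Claim_equal_matches_component_pattern_py : Prop := ∀ (app_instance : String) (component_path : String), Dom_matches_component_pattern_py app_instance component_path → Spec_matches_component_pattern_py app_instance component_path (matches_component_pattern_py app_instance component_path)

-- ===== LEMMAS AND PROOFS =====
theorem pv_eq (a c : String) : matches_component_pattern_py a c = matches_component_pattern_py_alt a c := by
  unfold matches_component_pattern_py matches_component_pattern_py_alt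
  simp only [pvMappingsA, pvIndexB, pvScanA]
  by_cases h1 : "nubus" = c <;> [skip; by_cases h2 : "open-xchange" = c] <;>
    [skip; skip; by_cases h3 : "nextcloud" = c] <;>
    [skip; skip; skip; by_cases h4 : "element" = c] <;>
    [skip; skip; skip; skip; by_cases h5 : "collabora" = c] <;>
    [skip; skip; skip; skip; skip; by_cases h6 : "cryptpad" = c] <;>
    [skip; skip; skip; skip; skip; skip; by_cases h7 : "jitsi" = c] <;>
    [skip; skip; skip; skip; skip; skip; skip; by_cases h8 : "openproject" = c] <;>
    [skip; skip; skip; skip; skip; skip; skip; skip; by_cases h9 : "xwiki" = c]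
  all_goals try subst_vars
  all_goals simp_all [PySem.Dict.getD_eq_get?_getD, PySem.Dict.get?, List.any]

-- ===== VERDICT (by name: the statement is the Claim_ definition above) =====
theorem matches_component_pattern_py_spec : Claim_equal_matches_component_pattern_py := by
  intro a c _
  exact pv_eq a c
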